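-- pv_equiv track=rewrite | github.com/GeorgeSigas/Classifiers | Bayes.py | cut
-- ===== SOURCE A (Python) =====
-- import collections
--
-- def cut(dictionary):#takes last 50 (most found)
--     copyDict=collections.OrderedDict(dictionary)
--     flag=len(dictionary)-50
--     i=1
--     for key in copyDict.keys():
--         if i>flag:
--             dictionary[key]=i-flag
--         else:
--             del dictionary[key]
--         i+=1
--     return dictionary
-- ===== SOURCE B (Python) =====
-- def cut(dictionary):  # keep at most 50 entries; the most recent entry ranks 50, counting down
--     items = list(dictionary.items())
--     ranked = [(key, rank) for (key, _), rank in zip(reversed(items), range(50, 0, -1))]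
--     dictionary.clear()
--     for key, rank in reversed(ranked):
--         dictionary[key] = rank
--     return dictionary
-- ===== Notes on version B (the rewrite author's own statement) =====
-- stated objective: alternative
-- what changed: Instead of walking every key with a running counter and deleting the leading ones, B zips the reversed items list with range(50,0,-1) so the most recent entry ranks 50 counting down (zip truncates to at most 50), clears the dict and repopulates it from the reversed ranking; Pre_ excludes association lists with duplicate keys, which do not represent a Python dict.
import Mathlib
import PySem

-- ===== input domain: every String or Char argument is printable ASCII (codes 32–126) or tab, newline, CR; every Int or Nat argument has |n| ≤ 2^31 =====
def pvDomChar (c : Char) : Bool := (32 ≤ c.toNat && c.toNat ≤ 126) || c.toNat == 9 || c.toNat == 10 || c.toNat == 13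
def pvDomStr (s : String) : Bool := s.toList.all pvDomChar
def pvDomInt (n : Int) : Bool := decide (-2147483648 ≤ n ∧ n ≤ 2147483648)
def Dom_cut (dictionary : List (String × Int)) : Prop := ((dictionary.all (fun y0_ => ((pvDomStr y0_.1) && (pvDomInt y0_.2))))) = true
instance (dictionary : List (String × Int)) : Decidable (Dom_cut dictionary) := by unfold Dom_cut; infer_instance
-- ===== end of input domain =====

-- B zips the reversed items with range(50,0,-1) — the most recent entry ranks 50, counting
-- down, zip truncating to at most 50 — then rebuilds the dict from the reversed ranking,
-- instead of walking every key with a running counter deleting the leading ones (objective: alternative).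
-- A mutates its argument in place (and returns it); the equivalence proved here is about the
-- returned association list; B performs the same clear-and-repopulate mutation in Python.

-- ===== PORT A =====
def cut (dictionary : List (String × Int)) : List (String × Int) :=
  let copyDict : PySem.Dict String Int := PySem.Dict.ofList dictionary
  let flag : Int := (dictionary.length : Int) - 50
  let res := copyDict.keys.foldl
    (fun (st : PySem.Dict String Int × Int) key =>
      if st.2 > flag then (st.1.insert key (st.2 - flag), st.2 + 1)
      else (st.1.erase key, st.2 + 1))
    (⟨dictionary⟩, 1)
  res.1.items

-- ===== PORT B =====
def cut_alt (dictionary : List (String × Int)) : List (String × Int) :=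
  let items := dictionary
  let ranked := (items.reverse.zip (PySem.List.pyRange 50 0 (-1))).map
    (fun p => (p.1.1, p.2))
  let d := ranked.reverse.foldl
    (fun (d : PySem.Dict String Int) p => d.insert p.1 p.2)
    PySem.Dict.empty
  d.items

-- ===== PRECONDITION & SPEC =====
-- Pre_cut excludes association lists with duplicate keys: they do not represent a Python dict,
-- so A's argument (a dict) never takes such a value.
def Pre_cut (dictionary : List (String × Int)) : Prop := (dictionary.map Prod.fst).Nodup
instance (dictionary : List (String × Int)) : Decidable (Pre_cut dictionary) := by unfold Pre_cut; infer_instance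
def pvWitness_cut : (List (String × Int)) := [("a", 3), ("b", 1)]

def Spec_cut (dictionary : List (String × Int)) (out : List (String × Int)) : Prop := out = cut_alt dictionary
instance (dictionary : List (String × Int)) (out : List (String × Int)) : Decidable (Spec_cut dictionary out) := by unfold Spec_cut; infer_instance

-- ===== CLAIM (what is proved, stated in full; the proofs are below) =====
def Claim_equal_cut : Prop := ∀ (dictionary : List (String × Int)), Dom_cut dictionary → Pre_cut dictionary → Spec_cut dictionary (cut dictionary)

-- ===== LEMMAS AND PROOFS =====

-- What A's loop leaves behind: entries of the suffix starting at 1-based position i,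
-- kept and renumbered when i > flag, dropped otherwise.
def pvRenum (flag : Int) : List (String × Int) → Int → List (String × Int)
  | [], _ => []
  | (k, _) :: t, i => if i > flag then (k, i - flag) :: pvRenum flag t (i + 1) else pvRenum flag t (i + 1)

lemma pv_loopA (flag : Int) (suf pre : List (String × Int)) (i : Int)
    (h : ((pre ++ suf).map Prod.fst).Nodup) :
    List.foldl (fun (st : PySem.Dict String Int × Int) key =>
        if st.2 > flag then (st.1.insert key (st.2 - flag), st.2 + 1)
        else (st.1.erase key, st.2 + 1))
      (⟨pre ++ suf⟩, i) (suf.map Prod.fst)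
    = (⟨pre ++ pvRenum flag suf i⟩, i + suf.length) := by
  induction suf generalizing pre i with
  | nil => simp [pvRenum]
  | cons hd tl ih =>
    obtain ⟨k, v⟩ := hd
    have h' := h
    rw [List.map_append, List.map_cons, List.nodup_append] at h'
    obtain ⟨hpreN, htlN, hdisj⟩ := h'
    have hkpre : k ∉ pre.map Prod.fst := fun hm => hdisj k hm k (by simp) rfl
    have hktl : k ∉ tl.map Prod.fst := (List.nodup_cons.mp htlN).1
    rw [List.map_cons, List.foldl_cons]
    by_cases hi : i > flag
    · have hins : (PySem.Dict.mk (pre ++ (k, v) :: tl)).insert k (i - flag)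
          = ⟨pre ++ (k, i - flag) :: tl⟩ := by
        have hcont : (PySem.Dict.mk (pre ++ (k, v) :: tl)).contains k = true := by
          simp [PySem.Dict.contains]
        simp only [PySem.Dict.insert, hcont, if_pos]
        congr 1
        rw [List.map_append, List.map_cons]
        have hpre : pre.map (fun p => if p.1 = k then (k, i - flag) else p) = pre := by
          conv_rhs => rw [← List.map_id pre]
          refine List.map_congr_left (fun p hp => ?_)
          have : p.1 ≠ k := fun e => hkpre (e ▸ List.mem_map_of_mem hp)
          simp [this]
        have htl : tl.map (fun p => if p.1 = k then (k, i - flag) else p) = tl := by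
          conv_rhs => rw [← List.map_id tl]
          refine List.map_congr_left (fun p hp => ?_)
          have : p.1 ≠ k := fun e => hktl (e ▸ List.mem_map_of_mem hp)
          simp [this]
        simp [hpre, htl]
      simp only [if_pos hi, hins]
      have hnd2 : (((pre ++ [(k, i - flag)]) ++ tl).map Prod.fst).Nodup := by
        rw [List.map_append] at h ⊢
        simpa using h
      have := ih (pre ++ [(k, i - flag)]) (i + 1) (by simpa [List.append_assoc] using hnd2)
      simp only [List.append_assoc, List.singleton_append] at this
      rw [this]
      simp only [pvRenum, if_pos hi, Prod.mk.injEq, List.length_cons]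
      refine ⟨trivial, by push_cast; ring⟩
    · have hera : (PySem.Dict.mk (pre ++ (k, v) :: tl)).erase k = ⟨pre ++ tl⟩ := by
        simp only [PySem.Dict.erase]
        congr 1
        rw [List.filter_append, List.filter_cons]
        have hpre : pre.filter (fun p => !(p.1 == k)) = pre := by
          refine List.filter_eq_self.mpr (fun p hp => ?_)
          have : p.1 ≠ k := fun e => hkpre (e ▸ List.mem_map_of_mem hp)
          simp [this]
        have htl : tl.filter (fun p => !(p.1 == k)) = tl := by
          refine List.filter_eq_self.mpr (fun p hp => ?_)
          have : p.1 ≠ k := fun e => hktl (e ▸ List.mem_map_of_mem hp)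
          simp [this]
        simp [hpre, htl]
      simp only [if_neg hi, hera]
      have hsub : (pre ++ tl).Sublist (pre ++ (k, v) :: tl) :=
        (List.sublist_cons_self (k, v) tl).append_left pre
      have hnd2 : ((pre ++ tl).map Prod.fst).Nodup := (hsub.map Prod.fst).nodup h
      rw [ih pre (i + 1) hnd2]
      simp only [pvRenum, if_neg hi, Prod.mk.injEq, List.length_cons]
      refine ⟨trivial, by push_cast; ring⟩

lemma pv_ofList_of_nodup (l : List (String × Int)) (h : (l.map Prod.fst).Nodup) :
    PySem.Dict.ofList l = (⟨l⟩ : PySem.Dict String Int) := by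
  apply PySem.Dict.ext
  have := PySem.Dict.items_foldl_insert_fresh l Prod.fst Prod.snd
      (PySem.Dict.empty : PySem.Dict String Int) (by intro a _; simp [pysem]) h
  simpa [PySem.Dict.ofList, PySem.Dict.update] using this

lemma pv_renum_skip (flag : Int) : ∀ (j : Nat) (l : List (String × Int)) (i : Int),
    i + j ≤ flag + 1 → pvRenum flag l i = pvRenum flag (l.drop j) (i + j) := by
  intro j
  induction j with
  | zero => intro l i _; simp
  | succ j ih =>
    intro l i hle
    cases l with
    | nil => simp [pvRenum]
    | cons hd t =>
      obtain ⟨k, v⟩ := hd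
      have hi : ¬ i > flag := by push_cast at hle; omega
      rw [List.drop_succ_cons]
      have := ih t (i + 1) (by push_cast at hle ⊢; omega)
      simp only [pvRenum, if_neg hi]
      rw [this]
      congr 1
      push_cast
      ring

lemma pv_renum_pos : ∀ (l : List (String × Int)) (i s flag : Int), flag < i →
    pvRenum flag l i = (PySem.List.enumerate l s).map (fun p => (p.2.1, p.1 - s + i - flag)) := by
  intro l
  induction l with
  | nil => intro i s flag _; simp [pvRenum, PySem.List.enumerate]
  | cons hd tl ih =>
    intro i s flag hi
    obtain ⟨k, v⟩ := hd
    rw [PySem.List.enumerate_cons, List.map_cons]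
    simp only [pvRenum, if_pos (show i > flag from hi)]
    rw [ih (i + 1) (s + 1) flag (by omega)]
    congr 1
    · exact Prod.ext rfl (by ring)
    · refine List.map_congr_left (fun p _ => Prod.ext rfl ?_)
      simp; ring

lemma pv_cut_eq (l : List (String × Int)) (h : (l.map Prod.fst).Nodup) :
    cut l = pvRenum ((l.length : Int) - 50) l 1 := by
  simp only [cut]
  rw [pv_ofList_of_nodup l h]
  have hkeys : (PySem.Dict.mk l : PySem.Dict String Int).keys = l.map Prod.fst := rfl
  rw [hkeys]
  have := pv_loopA ((l.length : Int) - 50) l [] 1 (by simpa using h)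
  simp only [List.nil_append] at this
  rw [this]

-- Common normal form: the kept suffix, enumerated from its first kept rank.
def pvNF (l : List (String × Int)) : List (String × Int) :=
  (PySem.List.enumerate (l.drop (l.length - 50)) (51 - ((min l.length 50 : Nat) : Int))).map
    (fun p => (p.2.1, p.1))

lemma pv_A_norm (l : List (String × Int)) (h : (l.map Prod.fst).Nodup) :
    cut l = pvNF l := by
  rw [pv_cut_eq l h]
  unfold pvNF
  by_cases hn : 50 ≤ l.length
  · have hm : min l.length 50 = 50 := by omega
    have hj := pv_renum_skip ((l.length : Int) - 50) (l.length - 50) l 1 (by omega)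
    rw [hj, pv_renum_pos _ _ (51 - ((min l.length 50 : Nat) : Int)) ((l.length : Int) - 50)
        (by omega)]
    refine List.map_congr_left (fun p _ => Prod.ext rfl ?_)
    rw [hm]; omega
  · have hm : min l.length 50 = l.length := by omega
    have hd : l.length - 50 = 0 := by omega
    rw [hd, List.drop_zero,
        pv_renum_pos l 1 (51 - ((min l.length 50 : Nat) : Int)) ((l.length : Int) - 50)
          (by omega)]
    refine List.map_congr_left (fun p _ => Prod.ext rfl ?_)
    rw [hm]; omega

lemma pv_zip_map_fst {α β : Type} (as : List α) (bs : List β) :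
    (as.zip bs).map Prod.fst = as.take bs.length := by
  induction as generalizing bs with
  | nil => simp
  | cons a t ih =>
    cases bs with
    | nil => simp
    | cons b bt => simp [ih]

lemma pv_R_eq : PySem.List.pyRange 50 0 (-1)
    = (List.range 50).map (fun k : Nat => ((50 : Int) - (k : Int))) := by
  rw [PySem.List.pyRange_neg_one]
  have : Int.toNat (50 - 0) = 50 := rfl
  rw [this]

lemma pv_B_norm (l : List (String × Int)) (h : (l.map Prod.fst).Nodup) :
    cut_alt l = pvNF l := by
  have hR : (PySem.List.pyRange 50 0 (-1)).length = 50 := by rw [pv_R_eq]; simp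
  -- keys of the ranked list (reversed) are distinct
  have hkeys : (((l.reverse.zip (PySem.List.pyRange 50 0 (-1))).map
      (fun p : (String × Int) × Int => (p.1.1, p.2))).reverse.map Prod.fst).Nodup := by
    rw [List.map_reverse, List.nodup_reverse, List.map_map]
    have : (Prod.fst ∘ fun p : (String × Int) × Int => (p.1.1, p.2))
        = (fun p : (String × Int) × Int => p.1.1) := rfl
    rw [this]
    have h2 : (fun p : (String × Int) × Int => p.1.1)
        = Prod.fst ∘ (Prod.fst (β := Int)) := rfl
    rw [h2, ← List.map_map, pv_zip_map_fst, hR]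
    have hsub : List.Sublist ((l.reverse.take 50).map Prod.fst) (l.reverse.map Prod.fst) :=
      (List.take_sublist _ _).map Prod.fst
    have : (l.reverse.map Prod.fst).Nodup := by
      rw [List.map_reverse, List.nodup_reverse]; exact h
    exact hsub.nodup this
  have hitems : cut_alt l = ((l.reverse.zip (PySem.List.pyRange 50 0 (-1))).map
      (fun p : (String × Int) × Int => (p.1.1, p.2))).reverse := by
    simp only [cut_alt]
    rw [PySem.Dict.items_foldl_insert_fresh _ Prod.fst Prod.snd PySem.Dict.empty
        (by intro a _; simp [pysem]) hkeys]
    simp [pysem, PySem.Dict.empty]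
  rw [hitems]
  unfold pvNF
  apply List.ext_getElem
  · simp [List.length_zip, hR, PySem.List.length_enumerate]
    omega
  · intro i h1 h2
    rw [List.getElem_reverse, List.getElem_map, List.getElem_map, List.getElem_zip,
        PySem.List.getElem_enumerate]
    have hlen : (List.map (fun p : (String × Int) × Int => (p.1.1, p.2))
        (l.reverse.zip (PySem.List.pyRange 50 0 (-1)))).length = min l.length 50 := by
      simp [List.length_zip, hR]
    simp only [hlen, List.length_reverse, List.length_map,
      PySem.List.length_enumerate, List.length_drop] at h1 h2 ⊢
    rw [List.getElem_reverse, List.getElem_drop]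
    have hidx : l.length - 1 - (min l.length 50 - 1 - i) = l.length - 50 + i := by omega
    simp only [hidx, pv_R_eq, List.getElem_map, List.getElem_range]
    refine Prod.ext rfl ?_
    dsimp only
    omega

-- ===== VERDICT (by name: the statement is the Claim_ definition above) =====
theorem cut_spec : Claim_equal_cut := by
  intro l _hdom hpre
  unfold Spec_cut
  rw [pv_A_norm l hpre, pv_B_norm l hpre]
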